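-- pv_equiv track=rewrite | github.com/Raphael-Hao/brainstorm | python/brt/jit/tvm/tuner.py | _sort_record_data_by_group
-- ===== SOURCE A (Python) =====
-- from itertools import groupby
--
-- def _sort_record_data_by_group(record_data: list):
--     record_data.sort(key=lambda x: x[1:3])
--     top_records = []
--     for _, g in groupby(record_data, key=lambda x: x[1:3]):
--         g = list(g)
--         g.sort(key=lambda x: x[0])
--         top_records.append(g[0])
--     top_records.sort(key=lambda x: x[0])
--     return top_records
-- ===== SOURCE B (Python) =====
-- def _sort_record_data_by_group(record_data: list):
--     best = {}
--     for x in record_data: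
--         key = tuple(x[1:3])
--         cur = best.get(key)
--         if cur is None or x[0] < cur[0]:
--             best[key] = x
--     return sorted(best.values(), key=lambda x: (x[0], x[1:3]))
-- ===== Notes on version B (the rewrite author's own statement) =====
-- stated objective: alternative
-- what changed: A sorts the whole list by x[1:3], groups consecutive runs and sorts each group by x[0] before taking its head, then sorts the winners; B makes one dict pass keyed by tuple(x[1:3]) keeping the first-seen minimum by x[0], then sorts only the k winners by (x[0], x[1:3]).
import Mathlib
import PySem

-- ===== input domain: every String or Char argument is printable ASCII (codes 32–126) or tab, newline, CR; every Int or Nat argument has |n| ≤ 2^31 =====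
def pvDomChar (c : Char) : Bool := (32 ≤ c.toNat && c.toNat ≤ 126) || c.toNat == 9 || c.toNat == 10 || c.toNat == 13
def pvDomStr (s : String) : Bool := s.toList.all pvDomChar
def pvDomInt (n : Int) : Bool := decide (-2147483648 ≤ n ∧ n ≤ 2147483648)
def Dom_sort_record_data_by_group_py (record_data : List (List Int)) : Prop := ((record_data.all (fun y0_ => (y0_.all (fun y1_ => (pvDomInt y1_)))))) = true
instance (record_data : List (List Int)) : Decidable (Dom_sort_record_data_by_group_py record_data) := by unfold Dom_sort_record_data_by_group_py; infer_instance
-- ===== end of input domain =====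

-- B replaces A's sort-whole-list + groupby + per-group sort by a single dict pass keeping the
-- per-group minimum, then sorts only the winners (objective: alternative). A sorts its argument in
-- place, B does not; the equivalence proved here is about the RETURN value only.

-- ===== PORT A =====
-- x[1:3]
def pvKey (x : List Int) : List Int := PySem.List.slice x (some 1) (some 3)
-- x[0] used as a sort key; rows are nonempty under Pre_, so pyGetD's default is never read there
def pvFst (x : List Int) : Int := PySem.List.pyGetD x 0 0

-- itertools.groupby(s, key): consecutive runs of equal key (key equality is transitive, so
-- comparing each element to the first of its run is exact)
def pvGroups (s : List (List Int)) : List (List (List Int)) :=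
  match s with
  | [] => []
  | x :: xs =>
      (x :: xs.takeWhile (fun y => pvKey y == pvKey x)) ::
        pvGroups (xs.dropWhile (fun y => pvKey y == pvKey x))
  termination_by s.length
  decreasing_by exact Nat.lt_succ_of_le (List.length_dropWhile_le _ _)

def sort_record_data_by_group_py (record_data : List (List Int)) : List (List Int) :=
  let s := PySem.List.sorted record_data pvKey
  let top_records := (pvGroups s).foldl
    (fun acc g =>
      match PySem.List.sorted g pvFst with
      | [] => acc            -- unreachable: groupby's groups are nonempty (Python reads g[0])
      | m :: _ => acc ++ [m]) []
  PySem.List.sorted top_records pvFst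

-- ===== PORT B =====
-- the loop body of Source B: keep the first-seen minimum by x[0] for the row's key
def pvStep (d : PySem.Dict (List Int) (List Int)) (x : List Int) : PySem.Dict (List Int) (List Int) :=
  match d.get? (pvKey x) with
  | none => d.insert (pvKey x) x
  | some cur => if pvFst x < pvFst cur then d.insert (pvKey x) x else d

def sort_record_data_by_group_py_alt (record_data : List (List Int)) : List (List Int) :=
  let best := record_data.foldl pvStep PySem.Dict.empty
  PySem.List.sorted2 best.values pvFst pvKey

-- ===== PRECONDITION & SPEC =====
-- Pre_ excludes inputs containing an empty row: there Python A raises IndexError (x[0]); B raises too.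
def Pre_sort_record_data_by_group_py (record_data : List (List Int)) : Prop :=
  ∀ r ∈ record_data, r ≠ []
instance (record_data : List (List Int)) : Decidable (Pre_sort_record_data_by_group_py record_data) := by unfold Pre_sort_record_data_by_group_py; infer_instance

def pvWitness_sort_record_data_by_group_py : List (List Int) := [[3, 7, 1], [1, 7, 1, 9], [2, 5], [0, 5]]

def Spec_sort_record_data_by_group_py (record_data : List (List Int)) (out : List (List Int)) : Prop := out = sort_record_data_by_group_py_alt record_data
instance (record_data : List (List Int)) (out : List (List Int)) : Decidable (Spec_sort_record_data_by_group_py record_data out) := by unfold Spec_sort_record_data_by_group_py; infer_instance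

-- ===== CLAIM (what is proved, stated in full; the proofs are below) =====
def Claim_equal_sort_record_data_by_group_py : Prop := ∀ (record_data : List (List Int)), Dom_sort_record_data_by_group_py record_data → Pre_sort_record_data_by_group_py record_data → Spec_sort_record_data_by_group_py record_data (sort_record_data_by_group_py record_data)

-- ===== LEMMAS AND PROOFS =====

-- proof-side abbreviations
def pvLexK (x : List Int) : Lex (Int × List Int) := toLex (pvFst x, pvKey x)
def pvMinOf (l : List (List Int)) : List Int :=
  match l with
  | [] => []
  | x :: t => t.foldl (fun m y => if pvFst y < pvFst m then y else m) x
def pvCls (p : List (List Int)) (c : List Int) : List (List Int) :=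
  p.filter (fun y => decide (pvKey y = c))
def pvLexR {α κ : Type} [LinearOrder κ] (f : α → κ) (r : α → α → Prop) (a b : α) : Prop :=
  f a < f b ∨ (f a = f b ∧ r a b)

-- generic insertion-sort facts (PySem.List.sorted is foldl insertBy)
theorem pv_insertBy_filter {α κ : Type} [LinearOrder κ] (f : α → κ) (c : κ) [DecidableEq κ] (x : α)
    (acc : List α) (hs : acc.Pairwise (fun a b => f a ≤ f b)) :
    (PySem.List.insertBy (fun a b => decide (f a < f b)) x acc).filter (fun y => decide (f y = c)) =
      acc.filter (fun y => decide (f y = c)) ++ (if f x = c then [x] else []) := by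
  induction acc with
  | nil => simp [PySem.List.insertBy]; split <;> simp_all
  | cons y ys ih =>
    rw [List.pairwise_cons] at hs
    obtain ⟨hy, hys⟩ := hs
    by_cases hlt : f x < f y
    · simp only [PySem.List.insertBy, hlt, decide_true, if_true]
      by_cases hc : f x = c
      · have hemp : (y :: ys).filter (fun z => decide (f z = c)) = [] := by
          rw [List.filter_eq_nil_iff]
          intro z hz
          have : f x < f z := by
            rcases List.mem_cons.1 hz with h | h
            · exact h ▸ hlt
            · exact lt_of_lt_of_le hlt (hy z h)
          simp only [decide_eq_true_eq]
          intro h; exact absurd (h ▸ this) (by simp [hc])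
        simp only [List.filter_cons, decide_eq_true_eq] at hemp ⊢
        rw [hemp]
        simp [hc]
      · simp [List.filter_cons, hc]
    · simp only [PySem.List.insertBy, hlt, decide_false, Bool.false_eq_true, if_false]
      rw [List.filter_cons, List.filter_cons, ih hys]
      split <;> simp

theorem pv_sorted_filter {α κ : Type} [LinearOrder κ] (f : α → κ) [DecidableEq κ] (c : κ)
    (xs : List α) :
    (PySem.List.sorted xs f).filter (fun y => decide (f y = c)) =
      xs.filter (fun y => decide (f y = c)) := by
  induction xs using List.reverseRecOn with
  | nil => simp [PySem.List.sorted]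
  | append_singleton l x ih =>
    rw [PySem.List.sorted_eq_foldl_insertBy, List.foldl_concat,
      ← PySem.List.sorted_eq_foldl_insertBy,
      pv_insertBy_filter f c x _ (PySem.List.sorted_pairwise l f), ih, List.filter_append]
    split <;> simp_all

theorem pv_sorted_cons_firstMin {α κ : Type} [LinearOrder κ] (f : α → κ) (l : List α) (x : α) :
    ∃ t, PySem.List.sorted (x :: l) f =
      (l.foldl (fun m y => if f y < f m then y else m) x) :: t := by
  induction l using List.reverseRecOn with
  | nil => exact ⟨[], by simp [PySem.List.sorted, PySem.List.insertBy]⟩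
  | append_singleton l y ih =>
    obtain ⟨t, ht⟩ := ih
    have : (x :: (l ++ [y])) = (x :: l) ++ [y] := by simp
    rw [this, PySem.List.sorted_eq_foldl_insertBy, List.foldl_concat,
      ← PySem.List.sorted_eq_foldl_insertBy, ht, List.foldl_concat]
    by_cases h : f y < f (l.foldl (fun m y => if f y < f m then y else m) x)
    · exact ⟨l.foldl (fun m y => if f y < f m then y else m) x :: t,
        by simp [PySem.List.insertBy, h]⟩
    · exact ⟨PySem.List.insertBy (fun a b => decide (f a < f b)) y t,
        by simp [PySem.List.insertBy, h]⟩

theorem pv_insertBy_pairwise_lex {α κ : Type} [LinearOrder κ] (f : α → κ) (r : α → α → Prop)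
    (x : α) (acc : List α) (hs : acc.Pairwise (pvLexR f r)) (hr : ∀ z ∈ acc, r z x) :
    (PySem.List.insertBy (fun a b => decide (f a < f b)) x acc).Pairwise (pvLexR f r) := by
  induction acc with
  | nil => simp [PySem.List.insertBy]
  | cons y ys ih =>
    rw [List.pairwise_cons] at hs
    obtain ⟨hy, hys⟩ := hs
    by_cases hlt : f x < f y
    · simp only [PySem.List.insertBy, hlt, decide_true, if_true]
      rw [List.pairwise_cons]
      refine ⟨?_, List.pairwise_cons.2 ⟨hy, hys⟩⟩
      intro z hz
      rcases List.mem_cons.1 hz with h | h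
      · exact Or.inl (h ▸ hlt)
      · exact Or.inl (lt_of_lt_of_le hlt (by
          rcases hy z h with h' | h'
          · exact le_of_lt h'
          · exact le_of_eq h'.1))
    · simp only [PySem.List.insertBy, hlt, decide_false, Bool.false_eq_true, if_false]
      rw [List.pairwise_cons]
      refine ⟨?_, ih hys (fun z hz => hr z (List.mem_cons_of_mem y hz))⟩
      intro z hz
      rcases (PySem.List.mem_insertBy _ _ _ _).1 hz with h | h
      · subst h
        rcases lt_or_eq_of_le (le_of_not_gt hlt) with h' | h'
        · exact Or.inl h'
        · exact Or.inr ⟨h', hr y (List.mem_cons_self)⟩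
      · exact hy z h

theorem pv_sorted_pairwise_lex {α κ : Type} [LinearOrder κ] (f : α → κ) (r : α → α → Prop)
    (xs : List α) (hx : xs.Pairwise r) :
    (PySem.List.sorted xs f).Pairwise (pvLexR f r) := by
  induction xs using List.reverseRecOn with
  | nil => simp [PySem.List.sorted]
  | append_singleton l x ih =>
    rw [List.pairwise_append] at hx
    obtain ⟨h1, _, h3⟩ := hx
    rw [PySem.List.sorted_eq_foldl_insertBy, List.foldl_concat, ← PySem.List.sorted_eq_foldl_insertBy]
    exact pv_insertBy_pairwise_lex f r x _ (ih h1)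
      (fun z hz => h3 z ((PySem.List.mem_sorted _ _ _ _).1 hz) x (List.mem_singleton.2 rfl))

theorem pv_firstMin_mem {α κ : Type} [LinearOrder κ] (f : α → κ) (x : α) (l : List α) :
    l.foldl (fun m y => if f y < f m then y else m) x ∈ x :: l := by
  induction l generalizing x with
  | nil => simp
  | cons y ys ih =>
    simp only [List.foldl_cons]
    by_cases h : f y < f x
    · simp only [h, if_pos]
      have := ih y
      simp only [List.mem_cons] at this ⊢
      tauto
    · simp only [h, if_false]
      have := ih x
      simp only [List.mem_cons] at this ⊢
      tauto

-- groupby facts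
theorem pv_groups_flatten (s : List (List Int)) : (pvGroups s).flatten = s := by
  induction s using pvGroups.induct with
  | case1 => simp [pvGroups]
  | case2 x xs ih =>
    rw [pvGroups]
    simp only [List.flatten_cons, ih]
    simp [List.takeWhile_append_dropWhile]

theorem pv_groups_spec (s : List (List Int)) (hs : s.Pairwise (fun a b => pvKey a ≤ pvKey b)) :
    (∀ g ∈ pvGroups s, ∃ x t, g = x :: t ∧ g = s.filter (fun y => decide (pvKey y = pvKey x)))
    ∧ (pvGroups s).Pairwise (fun g g' => ∀ a ∈ g, ∀ b ∈ g', pvKey a < pvKey b) := by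
  induction s using pvGroups.induct with
  | case1 => simp [pvGroups]
  | case2 x xs ih =>
    rw [List.pairwise_cons] at hs
    obtain ⟨hx, hxs⟩ := hs
    set tw := xs.takeWhile (fun y => pvKey y == pvKey x) with htw_def
    set dw := xs.dropWhile (fun y => pvKey y == pvKey x) with hdw_def
    have hxs_split : tw ++ dw = xs := List.takeWhile_append_dropWhile
    have htw : ∀ z ∈ tw, pvKey z = pvKey x := by
      intro z hz
      have := List.mem_takeWhile_imp hz
      simpa using this
    have hdw_pw : dw.Pairwise (fun a b => pvKey a ≤ pvKey b) :=
      List.Pairwise.sublist (List.dropWhile_sublist _) hxs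
    have hdw_mem : ∀ z ∈ dw, z ∈ xs := fun z hz => (List.dropWhile_sublist _).subset hz
    have hdw : ∀ z ∈ dw, pvKey x < pvKey z := by
      intro z hz
      cases hd : dw with
      | nil => rw [hd] at hz; simp at hz
      | cons y0 t0 =>
        have hne : dw ≠ [] := by rw [hd]; simp
        have hy0 : (fun y => pvKey y == pvKey x) (dw.head hne) = false :=
          List.head_dropWhile_not _ hne
        have hhead : dw.head hne = y0 := by simp [hd]
        rw [hhead] at hy0
        have hy0ne : pvKey y0 ≠ pvKey x := by simpa using hy0
        have hy0le : pvKey x ≤ pvKey y0 := hx y0 (hdw_mem y0 (by rw [hd]; simp))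
        have hy0lt : pvKey x < pvKey y0 := lt_of_le_of_ne hy0le (Ne.symm hy0ne)
        rw [hd] at hz
        rcases List.mem_cons.1 hz with h | h
        · exact h ▸ hy0lt
        · rw [hd] at hdw_pw
          rw [List.pairwise_cons] at hdw_pw
          exact lt_of_lt_of_le hy0lt (hdw_pw.1 z h)
    obtain ⟨ih1, ih2⟩ := ih hdw_pw
    have hg0 : (x :: tw) = (x :: xs).filter (fun y => decide (pvKey y = pvKey x)) := by
      rw [← hxs_split]
      simp only [List.filter_cons, List.filter_append, decide_eq_true_eq]
      rw [if_pos trivial]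
      have h1 : tw.filter (fun y => decide (pvKey y = pvKey x)) = tw :=
        List.filter_eq_self.2 (fun z hz => by simpa using htw z hz)
      have h2 : dw.filter (fun y => decide (pvKey y = pvKey x)) = [] :=
        List.filter_eq_nil_iff.2 (fun z hz => by simpa using ne_of_gt (hdw z hz))
      rw [h1, h2, List.append_nil]
    have hmemflat : ∀ g ∈ pvGroups dw, ∀ b ∈ g, b ∈ dw := by
      intro g hg b hb
      rw [← pv_groups_flatten dw]
      exact List.mem_flatten.2 ⟨g, hg, hb⟩
    constructor
    · intro g hg
      rw [pvGroups] at hg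
      rcases List.mem_cons.1 hg with h | h
      · exact ⟨x, tw, h, by rw [h]; exact hg0⟩
      · obtain ⟨y, t, hyt, hfil⟩ := ih1 g h
        refine ⟨y, t, hyt, ?_⟩
        have hy_dw : y ∈ dw := hmemflat g h y (by rw [hyt]; simp)
        have hky : pvKey x < pvKey y := hdw y hy_dw
        rw [← hxs_split]
        simp only [List.filter_cons, List.filter_append, decide_eq_true_eq]
        rw [if_neg (by exact fun h' => absurd (h' ▸ hky) (lt_irrefl _))]
        have h1 : tw.filter (fun z => decide (pvKey z = pvKey y)) = [] :=
          List.filter_eq_nil_iff.2 (fun z hz => by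
            simp only [decide_eq_true_eq]
            intro h'
            exact absurd ((htw z hz) ▸ h' ▸ hky) (lt_irrefl _))
        rw [h1, List.nil_append, ← hfil]
    · rw [pvGroups, List.pairwise_cons]
      refine ⟨?_, ih2⟩
      intro g' hg' a ha b hb
      have hb_dw : b ∈ dw := hmemflat g' hg' b hb
      have hka : pvKey a = pvKey x := by
        rcases List.mem_cons.1 ha with h | h
        · exact h ▸ rfl
        · exact htw a h
      exact hka ▸ hdw b hb_dw

-- dict facts
theorem pv_find_beq_self (l : List (List Int)) (c : List Int) :
    l.find? (fun y => y == c) = if c ∈ l then some c else none := by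
  induction l with
  | nil => simp
  | cons a l ih =>
    by_cases h : a = c
    · subst h; simp
    · rw [List.find?_cons]
      have : (a == c) = false := by simpa using h
      rw [this]
      simp only [List.mem_cons]
      rw [ih]
      by_cases hc : c ∈ l <;> simp [hc, Ne.symm h]

theorem pv_any_beq (l : List (List Int)) (a : List Int) :
    (l.any fun c => c == a) = decide (a ∈ l) := by
  induction l with
  | nil => simp
  | cons b l ih =>
    simp only [List.any_cons, ih, List.mem_cons]
    have : (b == a) = decide (a = b) := by
      by_cases h : a = b <;> simp [h, Ne.symm]
    rw [this]
    by_cases h : a = b <;> by_cases h2 : a ∈ l <;> simp [h, h2]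

theorem pv_dedup_concat (l : List (List Int)) (a : List Int) :
    PySem.List.dedup (l ++ [a]) =
      if a ∈ PySem.List.dedup l then PySem.List.dedup l else PySem.List.dedup l ++ [a] := by
  show PySem.Set.ofList (l ++ [a]) = _
  rw [PySem.Set.ofList_eq_foldl, List.foldl_append, ← PySem.Set.ofList_eq_foldl]
  simp only [List.foldl_cons, List.foldl_nil]
  show PySem.Set.add _ a = _
  unfold PySem.Set.add PySem.Set.contains
  split <;> rename_i h <;> [rw [if_pos]; rw [if_neg]] <;> simp_all

theorem pv_mem_dedup (l : List (List Int)) (c : List Int) :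
    c ∈ PySem.List.dedup l ↔ c ∈ l := PySem.Set.mem_ofList l c

theorem pv_cls_concat (p : List (List Int)) (x : List Int) (c : List Int) :
    pvCls (p ++ [x]) c = pvCls p c ++ (if pvKey x = c then [x] else []) := by
  unfold pvCls
  rw [List.filter_append]
  split <;> simp_all

theorem pv_minOf_concat (l : List (List Int)) (x : List Int) (h : l ≠ []) :
    pvMinOf (l ++ [x]) = if pvFst x < pvFst (pvMinOf l) then x else pvMinOf l := by
  cases l with
  | nil => simp at h
  | cons y t => simp [pvMinOf]

theorem pv_best_items (p : List (List Int)) :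
    (p.foldl pvStep PySem.Dict.empty).items =
      (PySem.List.dedup (p.map pvKey)).map (fun c => (c, pvMinOf (pvCls p c))) := by
  induction p using List.reverseRecOn with
  | nil => simp [PySem.Dict.empty, PySem.List.dedup, PySem.Set.ofList]
  | append_singleton p x ih =>
    rw [List.foldl_concat]
    have hget : (p.foldl pvStep PySem.Dict.empty).get? (pvKey x) =
        if pvKey x ∈ PySem.List.dedup (p.map pvKey) then some (pvMinOf (pvCls p (pvKey x))) else none := by
      unfold PySem.Dict.get?
      rw [ih, List.find?_map]
      have : ((fun pr : (List Int) × (List Int) => pr.1 == pvKey x) ∘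
          (fun c => (c, pvMinOf (pvCls p c)))) = fun c => c == pvKey x := rfl
      rw [this, pv_find_beq_self]
      split <;> simp
    have hcont : (p.foldl pvStep PySem.Dict.empty).contains (pvKey x) =
        decide (pvKey x ∈ PySem.List.dedup (p.map pvKey)) := by
      unfold PySem.Dict.contains
      rw [ih, List.any_map]
      have : ((fun pr : (List Int) × (List Int) => pr.1 == pvKey x) ∘
          (fun c => (c, pvMinOf (pvCls p c)))) = fun c => c == pvKey x := rfl
      rw [this, pv_any_beq]
    have hrhskeys : (p ++ [x]).map pvKey = p.map pvKey ++ [pvKey x] := by simp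
    by_cases hmem : pvKey x ∈ PySem.List.dedup (p.map pvKey)
    · -- key already present
      have hclsne : pvCls p (pvKey x) ≠ [] := by
        rw [pv_mem_dedup, List.mem_map] at hmem
        obtain ⟨y, hy, hky⟩ := hmem
        exact List.ne_nil_of_mem (List.mem_filter.2 ⟨hy, by simpa using hky⟩)
      rw [if_pos hmem] at hget
      rw [hrhskeys, pv_dedup_concat, if_pos hmem]
      simp only [pvStep, hget]
      by_cases hlt : pvFst x < pvFst (pvMinOf (pvCls p (pvKey x)))
      · rw [if_pos hlt]
        unfold PySem.Dict.insert
        rw [hcont, decide_eq_true hmem]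
        simp only [if_true, ih, List.map_map]
        apply List.map_congr_left
        intro c hc
        by_cases hcx : c = pvKey x
        · subst hcx
          simp only [Function.comp_apply, BEq.rfl, if_true]
          rw [pv_cls_concat, if_pos rfl, pv_minOf_concat _ _ hclsne, if_pos hlt]
        · have : (c == pvKey x) = false := by simpa using hcx
          simp only [Function.comp_apply, this, Bool.false_eq_true, if_false]
          rw [pv_cls_concat, if_neg (fun h => hcx h.symm), List.append_nil]
      · rw [if_neg hlt, ih]
        apply List.map_congr_left
        intro c hc
        by_cases hcx : c = pvKey x
        · subst hcx
          rw [pv_cls_concat, if_pos rfl, pv_minOf_concat _ _ hclsne, if_neg hlt]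
        · rw [pv_cls_concat, if_neg (fun h => hcx h.symm), List.append_nil]
    · -- new key
      have hclsnil : pvCls p (pvKey x) = [] := by
        rw [pv_mem_dedup, List.mem_map] at hmem
        apply List.filter_eq_nil_iff.2
        intro y hy
        simp only [decide_eq_true_eq]
        exact fun h => hmem ⟨y, hy, h⟩
      rw [if_neg hmem] at hget
      rw [hrhskeys, pv_dedup_concat, if_neg hmem]
      simp only [pvStep, hget]
      unfold PySem.Dict.insert
      rw [hcont, decide_eq_false hmem]
      simp only [Bool.false_eq_true, if_false, ih, List.map_append]
      congr 1
      · apply List.map_congr_left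
        intro c hc
        have hcx : c ≠ pvKey x := fun h => hmem (h ▸ hc)
        rw [pv_cls_concat, if_neg (fun h => hcx h.symm), List.append_nil]
      · simp only [List.map_cons, List.map_nil]
        rw [pv_cls_concat, if_pos rfl, hclsnil]
        rfl

-- sorted2 with a tuple key is sorted with the lexicographic key
theorem pv_sorted2_eq (xs : List (List Int)) :
    PySem.List.sorted2 xs pvFst pvKey = PySem.List.sorted xs pvLexK := by
  have hbf : (fun a b => decide (pvFst a < pvFst b) || (!decide (pvFst b < pvFst a) && decide (pvKey a < pvKey b)))
      = (fun a b => decide (pvLexK a < pvLexK b)) := by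
    funext a b
    have hiff : pvLexK a < pvLexK b ↔ (pvFst a < pvFst b ∨ (pvFst a = pvFst b ∧ pvKey a < pvKey b)) := by
      rw [Prod.Lex.lt_iff]; rfl
    rcases lt_trichotomy (pvFst a) (pvFst b) with h | h | h
    · simp [hiff, h, asymm h]
    · simp [hiff, h]
    · simp [hiff, h, asymm h, ne_of_gt h]
  unfold PySem.List.sorted2 PySem.List.sorted
  simp only [Bool.false_eq_true, if_false]
  rw [hbf]

-- the List-Int-key sorted in port A elaborates with core's `List.instLT`; the order lemmas
-- above use the `LinearOrder` instances.  These two orders agree, so the two sorted terms are equal.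
theorem pv_listlt_iff (a b : List Int) :
    (@LT.lt (List ℤ) List.instLT a b) ↔ (a < b) :=
  (List.lt_iff_lex_lt a b).trans Iff.rfl

def pvSortedLO {α κ : Type} [LinearOrder κ] (xs : List α) (key : α → κ) : List α :=
  PySem.List.sorted xs key

theorem pvSortedLO_pairwise {α κ : Type} [LinearOrder κ] (xs : List α) (key : α → κ) :
    (pvSortedLO xs key).Pairwise (fun a b => key a ≤ key b) :=
  PySem.List.sorted_pairwise xs key

theorem pvSortedLO_filter {α κ : Type} [LinearOrder κ] [DecidableEq κ] (f : α → κ) (c : κ)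
    (xs : List α) :
    (pvSortedLO xs f).filter (fun y => decide (f y = c)) = xs.filter (fun y => decide (f y = c)) :=
  pv_sorted_filter f c xs

theorem pvSortedLO_mem {α κ : Type} [LinearOrder κ] (xs : List α) (key : α → κ) (x : α) :
    x ∈ pvSortedLO xs key ↔ x ∈ xs :=
  PySem.List.mem_sorted xs key false x

theorem pv_sorted_before_congr {α κ₁ κ₂ : Type} (i1 : LT κ₁) (d1 : DecidableLT κ₁)
    (i2 : LT κ₂) (d2 : DecidableLT κ₂) (xs : List α) (k1 : α → κ₁) (k2 : α → κ₂)
    (h : ∀ a b, @decide (@LT.lt κ₁ i1 (k1 a) (k1 b)) (d1 (k1 a) (k1 b))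
              = @decide (@LT.lt κ₂ i2 (k2 a) (k2 b)) (d2 (k2 a) (k2 b))) :
    @PySem.List.sorted α κ₁ i1 d1 xs k1 false = @PySem.List.sorted α κ₂ i2 d2 xs k2 false := by
  rw [PySem.List.sorted_eq_foldl_insertBy, PySem.List.sorted_eq_foldl_insertBy]
  congr 1
  funext acc x
  congr 1
  funext a b
  exact h a b

theorem pv_core_eq_LO {α : Type} (xs : List α) (key : α → List Int) :
    PySem.List.sorted xs key = pvSortedLO xs key := by
  unfold pvSortedLO
  apply pv_sorted_before_congr
  intro a b
  exact decide_eq_decide.2 (pv_listlt_iff _ _)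


theorem pv_main (N : List (List Int)) :
    sort_record_data_by_group_py N = sort_record_data_by_group_py_alt N := by
  simp only [sort_record_data_by_group_py, sort_record_data_by_group_py_alt]
  rw [pv_sorted2_eq, pv_core_eq_LO]
  set S := pvSortedLO N pvKey with hSdef
  have hSpw : S.Pairwise (fun a b => pvKey a ≤ pvKey b) := pvSortedLO_pairwise N pvKey
  obtain ⟨hGrp, hCross⟩ := pv_groups_spec S hSpw
  have hlexiff : ∀ a b : List Int,
      pvLexK a < pvLexK b ↔ (pvFst a < pvFst b ∨ (pvFst a = pvFst b ∧ pvKey a < pvKey b)) :=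
    fun a b => by rw [Prod.Lex.lt_iff]; exact Iff.rfl
  have hGrp' : ∀ g ∈ pvGroups S,
      g = pvCls N (pvKey (pvMinOf g)) ∧ pvMinOf g ∈ g ∧ pvMinOf g ∈ N := by
    intro g hg
    obtain ⟨x, t, hxt, hfil⟩ := hGrp g hg
    have hmin_mem : pvMinOf g ∈ g := by rw [hxt]; exact pv_firstMin_mem pvFst x t
    have hkey : pvKey (pvMinOf g) = pvKey x := by
      have hm : pvMinOf g ∈ S.filter (fun y => decide (pvKey y = pvKey x)) := hfil ▸ hmin_mem
      simpa using (List.mem_filter.1 hm).2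
    have hcls : g = pvCls N (pvKey (pvMinOf g)) := by
      rw [hkey, hfil, hSdef, pvSortedLO_filter]
      rfl
    refine ⟨hcls, hmin_mem, ?_⟩
    have : pvMinOf g ∈ pvCls N (pvKey (pvMinOf g)) := hcls ▸ hmin_mem
    exact (List.mem_filter.1 this).1
  have htop : ((pvGroups S).foldl (fun acc g => match PySem.List.sorted g pvFst with
      | [] => acc
      | m :: _ => acc ++ [m]) []) = (pvGroups S).map pvMinOf := by
    rw [PySem.List.foldl_congr_mem (pvGroups S) _ (fun acc g => acc ++ [pvMinOf g]) []
      (by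
        intro acc g hg
        obtain ⟨x, t, hxt, _⟩ := hGrp g hg
        obtain ⟨t', ht'⟩ := pv_sorted_cons_firstMin pvFst t x
        rw [hxt, ht']
        rfl)]
    simpa using PySem.List.foldl_append_singleton_eq_map pvMinOf (pvGroups S) []
  rw [htop]
  have hval : (N.foldl pvStep PySem.Dict.empty).values
      = (PySem.List.dedup (N.map pvKey)).map (fun c => pvMinOf (pvCls N c)) := by
    unfold PySem.Dict.values
    rw [pv_best_items, List.map_map]
    rfl
  rw [hval]
  set D := PySem.List.dedup (N.map pvKey) with hD
  have hDnodup : D.Nodup := PySem.Set.nodup_ofList _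
  set GK := (pvGroups S).map (fun g => pvKey (pvMinOf g)) with hGK
  have hAtop : (pvGroups S).map pvMinOf = GK.map (fun c => pvMinOf (pvCls N c)) := by
    rw [hGK, List.map_map]
    apply List.map_congr_left
    intro g hg
    exact congrArg pvMinOf (hGrp' g hg).1
  have hGKlt : GK.Pairwise (· < ·) := by
    rw [hGK, List.pairwise_map]
    exact hCross.imp_of_mem (fun {g g'} hg hg' h =>
      h _ (hGrp' g hg).2.1 _ (hGrp' g' hg').2.1)
  have hGKnodup : GK.Nodup := hGKlt.imp (fun {a b} h => ne_of_lt h)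
  have hFkey : ∀ c ∈ D, pvKey (pvMinOf (pvCls N c)) = c := by
    intro c hc
    rw [hD, pv_mem_dedup, List.mem_map] at hc
    obtain ⟨y, hy, hky⟩ := hc
    have hmemy : y ∈ pvCls N c := List.mem_filter.2 ⟨hy, by simpa using hky⟩
    cases hcl : pvCls N c with
    | nil => rw [hcl] at hmemy; simp at hmemy
    | cons a t =>
      have hmm : pvMinOf (a :: t) ∈ (a :: t) := pv_firstMin_mem pvFst a t
      have hmm2 : pvMinOf (a :: t) ∈ pvCls N c := hcl ▸ hmm
      simpa using (List.mem_filter.1 hmm2).2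
  have hmemGKD : ∀ c, c ∈ GK ↔ c ∈ D := by
    intro c
    constructor
    · rw [hGK]
      intro hc
      rcases List.mem_map.1 hc with ⟨g, hg, rfl⟩
      rw [hD, pv_mem_dedup]
      exact List.mem_map.2 ⟨pvMinOf g, (hGrp' g hg).2.2, rfl⟩
    · intro hc
      rw [hD, pv_mem_dedup, List.mem_map] at hc
      obtain ⟨y, hy, hky⟩ := hc
      have hyS : y ∈ S := by rw [hSdef]; exact (pvSortedLO_mem N pvKey y).2 hy
      rw [← pv_groups_flatten S] at hyS
      obtain ⟨g, hg, hyg⟩ := List.mem_flatten.1 hyS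
      obtain ⟨x, t, hxt, hfil⟩ := hGrp g hg
      have h1 : pvKey y = pvKey x := by
        have hm : y ∈ S.filter (fun z => decide (pvKey z = pvKey x)) := hfil ▸ hyg
        simpa using (List.mem_filter.1 hm).2
      have h2 : pvKey (pvMinOf g) = pvKey x := by
        have hmm : pvMinOf g ∈ g := by rw [hxt]; exact pv_firstMin_mem pvFst x t
        have hm : pvMinOf g ∈ S.filter (fun z => decide (pvKey z = pvKey x)) := hfil ▸ hmm
        simpa using (List.mem_filter.1 hm).2
      rw [hGK]
      exact List.mem_map.2 ⟨g, hg, by rw [h2, ← h1, hky]⟩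
  have hperm : GK.Perm D := (List.perm_ext_iff_of_nodup hGKnodup hDnodup).2 hmemGKD
  have hpermTop : ((pvGroups S).map pvMinOf).Perm (D.map fun c => pvMinOf (pvCls N c)) := by
    rw [hAtop]; exact hperm.map _
  have hAstrong : (PySem.List.sorted ((pvGroups S).map pvMinOf) pvFst).Pairwise
      (fun a b => pvLexK a < pvLexK b) := by
    have h1 : ((pvGroups S).map pvMinOf).Pairwise (fun a b => pvKey a < pvKey b) := by
      rw [List.pairwise_map]
      exact hCross.imp_of_mem (fun {g g'} hg hg' h =>
        h _ (hGrp' g hg).2.1 _ (hGrp' g' hg').2.1)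
    exact (pv_sorted_pairwise_lex pvFst (fun a b => pvKey a < pvKey b) _ h1).imp
      (fun {a b} h => (hlexiff a b).2 h)
  have hBstrong : (PySem.List.sorted (D.map fun c => pvMinOf (pvCls N c)) pvLexK).Pairwise
      (fun a b => pvLexK a < pvLexK b) := by
    have hVnodup : ((D.map fun c => pvMinOf (pvCls N c)).map pvKey).Nodup := by
      rw [List.map_map]
      have hmapeq : List.map (pvKey ∘ fun c => pvMinOf (pvCls N c)) D = List.map id D :=
        List.map_congr_left (fun c hc => hFkey c hc)
      rw [hmapeq, List.map_id]
      exact hDnodup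
    have hVne : (D.map fun c => pvMinOf (pvCls N c)).Pairwise (fun a b => pvKey a ≠ pvKey b) :=
      List.pairwise_map.1 hVnodup
    have hne' : (PySem.List.sorted (D.map fun c => pvMinOf (pvCls N c)) pvLexK).Pairwise
        (fun a b => pvKey a ≠ pvKey b) :=
      (List.Perm.pairwise_iff (fun {a b} h => Ne.symm h)
        (PySem.List.sorted_perm _ _ _)).2 hVne
    have hle := PySem.List.sorted_pairwise (D.map fun c => pvMinOf (pvCls N c)) pvLexK
    exact (hle.and hne').imp (fun {a b} h =>
      lt_of_le_of_ne h.1 (fun he => h.2 (congrArg (fun z => (ofLex z).2) he)))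
  exact List.Perm.eq_of_pairwise
    (fun a b _ _ h1 h2 => absurd h2 (lt_asymm h1)) hAstrong hBstrong
    (((PySem.List.sorted_perm _ _ _).trans hpermTop).trans (PySem.List.sorted_perm _ _ _).symm)


-- ===== VERDICT (by name: the statement is the Claim_ definition above) =====
theorem sort_record_data_by_group_py_spec : Claim_equal_sort_record_data_by_group_py := by
  intro N _ _
  unfold Spec_sort_record_data_by_group_py
  exact pv_main N
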